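-- pv_equiv track=rewrite | github.com/Aryudesu/ARC | 140/ARC140A.py | calc
-- ===== SOURCE A (Python) =====
-- def yakusu(L):
--     res = []
--     for i in range(1, L+1):
--         if L%i == 0:
--             res.append(i)
--     return res
--
-- def makeDict(N, K, S, y):
--     # 約数文字ごとに文字を分割
--     L = [S[i:i+y] for i in range(0,len(S), y)]
--     # 1文字ごとに結果を格納
--     res = []
--     for l in range(len(L[0])):
--         res.append({})
--     # 分割文字列ごとの捜査
--     for l in range(len(L)):
--         # 1文字に対して調べる
--         for lidx in range(len(L[l])):
--             # 該当文字数目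
--             d = res[lidx]
--             c = d.setdefault(L[l][lidx], 0)
--             d[L[l][lidx]] = c + 1
--             res[lidx] = d
--     return res
--
-- def calc(N, K, S):
--     L = len(S)
--     # 約数調べる
--     Y = yakusu(L)
--     res = N
--     # 約数全部探索
--     for y in Y:
--         # 文字分割して辞書リスト
--         D = makeDict(N, K, S, y)
--         # 辞書回す
--         count = 0
--         # n文字目の辞書
--         for d in D:
--             keys = d.keys()
--             # 一番使われてる文字数捜査
--             k_max = 0
--             for key in keys:
--                 if k_max < d[key]:
--                     k_max = d[key]
--             count += N//y - k_max
--         if count > K: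
--             continue
--         if res > y:
--             res = y
--     return res
-- ===== SOURCE B (Python) =====
-- def calc(N, K, S):
--     # Divisors harvested in factor pairs up to sqrt(L) (unordered set), cost of a
--     # block size measured by run-lengths in each sorted residue column, and the
--     # answer taken as min over N and all acceptable block sizes at the end.
--     L = len(S)
--     divs = set()
--     d = 1
--     while d * d <= L:
--         if L % d == 0:
--             divs.add(d)
--             divs.add(L // d)
--         d += 1
--     good = [N]
--     for y in divs:
--         cost = 0
--         for r in range(y):
--             col = sorted(S[i] for i in range(r, L, y))
--             run = 0
--             best = 0
--             prev = None
--             for ch in col: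
--                 run = run + 1 if ch == prev else 1
--                 prev = ch
--                 if run > best:
--                     best = run
--             cost += N // y - best
--         if cost <= K:
--             good.append(y)
--     return min(good)
-- ===== Notes on version B (the rewrite author's own statement) =====
-- stated objective: alternative
-- what changed: A enumerates all block sizes 1..L keeping divisors, splits S into chunks and transposes them into one frequency dict per position (setdefault/increment), scans each dict's keys for the max and folds the smallest acceptable divisor; B instead harvests divisors in factor pairs d, L//d up to sqrt(L) into a set, measures each residue class by sorting the column and taking the longest equal run (no frequency dict at all), collects every acceptable block size and returns min over them and N at the end.
import Mathlib
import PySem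

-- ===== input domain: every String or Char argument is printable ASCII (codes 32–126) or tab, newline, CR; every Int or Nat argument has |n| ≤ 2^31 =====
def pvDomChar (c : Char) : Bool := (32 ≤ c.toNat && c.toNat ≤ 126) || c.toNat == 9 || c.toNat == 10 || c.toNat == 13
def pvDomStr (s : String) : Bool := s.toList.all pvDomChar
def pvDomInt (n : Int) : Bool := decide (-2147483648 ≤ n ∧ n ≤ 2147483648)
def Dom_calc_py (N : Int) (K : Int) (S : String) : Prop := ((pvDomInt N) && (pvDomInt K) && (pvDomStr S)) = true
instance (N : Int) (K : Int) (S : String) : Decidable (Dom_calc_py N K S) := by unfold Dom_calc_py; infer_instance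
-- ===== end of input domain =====

-- B harvests divisors in factor pairs up to sqrt(L) into a set, measures each residue
-- class by the longest equal run of its sorted column (no frequency dict), and returns
-- the min over N and all acceptable block sizes collected at the end (equal values).

-- ===== PORT A =====
-- list assignment xs[i] = v (exact for the in-range indices A's loops produce)
def pyListSet {α : Type} (xs : List α) (i : Int) (v : α) : List α := xs.set i.toNat v

def yakusuPy (L : Int) : List Int :=
  (PySem.List.pyRange 1 (L + 1) 1).foldl
    (fun res i => if PySem.Int.mod L i == 0 then res ++ [i] else res) []

def makeDictPy (_N _K : Int) (S : String) (y : Int) : List (PySem.Dict Char Int) :=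
  -- L = [S[i:i+y] for i in range(0, len(S), y)]
  let Ls : List String :=
    (PySem.List.pyRange 0 (PySem.Str.len S) y).map (fun i => PySem.Str.slice S (some i) (some (i + y)))
  -- res = [{} for _ in range(len(L[0]))]   (L[0]: calc only calls this with S nonempty, so index 0 is in range)
  let res0 : List (PySem.Dict Char Int) :=
    (PySem.List.pyRange 0 (PySem.Str.len (PySem.List.pyGetD Ls 0 "")) 1).foldl
      (fun r _ => r ++ [PySem.Dict.empty]) []
  -- for l in range(len(L)): for lidx in range(len(L[l])): …
  (PySem.List.pyRange 0 (Ls.length : Int) 1).foldl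
    (fun res l =>
      let chunk := PySem.List.pyGetD Ls l ""
      (PySem.List.pyRange 0 (PySem.Str.len chunk) 1).foldl
        (fun res lidx =>
          let d := PySem.List.pyGetD res lidx PySem.Dict.empty
          let ch := PySem.List.pyGetD chunk.toList lidx ' '   -- L[l][lidx] (in range)
          let d := PySem.Dict.setdefault d ch 0
          let c := PySem.Dict.getD d ch 0                      -- value returned by setdefault
          let d := PySem.Dict.insert d ch (c + 1)
          pyListSet res lidx d)
        res)
    res0

def calc_py (N : Int) (K : Int) (S : String) : Int :=
  let L : Int := PySem.Str.len S
  let Y := yakusuPy L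
  Y.foldl
    (fun res y =>
      let D := makeDictPy N K S y
      let count := D.foldl
        (fun count d =>
          let keys := d.keys
          let kmax := keys.foldl
            (fun kmax key => if kmax < PySem.Dict.getD d key 0 then PySem.Dict.getD d key 0 else kmax) 0
          count + (PySem.Int.floordiv N y - kmax)) 0
      if count > K then res else if res > y then y else res)
    N

-- ===== PORT B =====
-- while d*d <= L: collect d and L//d into the divisor set
def sqrtDivsGo (L : Int) (d : Int) (s : PySem.Set Int) : PySem.Set Int :=
  if d * d ≤ L then
    sqrtDivsGo L (d + 1)
      (if PySem.Int.mod L d == 0 then (s.add d).add (PySem.Int.floordiv L d) else s)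
  else s
termination_by (L + 1 - d).toNat
decreasing_by
  rename_i h
  have h1 : 2 * d - 1 ≤ L := by nlinarith [sq_nonneg (d - 1)]
  have h2 : 0 ≤ L := by nlinarith [mul_self_nonneg d]
  omega

-- one step of the run-length scan over a sorted column: state (run, best, prev)
def runScan (st : Int × Int × Option Char) (ch : Char) : Int × Int × Option Char :=
  let run := if (some ch == st.2.2) then st.1 + 1 else 1
  let best := if run > st.2.1 then run else st.2.1
  (run, best, some ch)

def calc_py_alt (N : Int) (K : Int) (S : String) : Int :=
  let L : Int := PySem.Str.len S
  let divs : PySem.Set Int := sqrtDivsGo L 1 PySem.Set.empty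
  let good : List Int := divs.foldl (fun good y =>
    let cost := (PySem.List.pyRange 0 y 1).foldl (fun cost r =>
      let col := PySem.List.sorted
        ((PySem.List.pyRange r L y).map (fun i => PySem.List.pyGetD S.toList i ' '))  -- S[i], always in range here
        (fun c => c)
      let fin := col.foldl runScan (0, 0, none)
      cost + (PySem.Int.floordiv N y - fin.2.1)) 0
    if cost ≤ K then good ++ [y] else good) [N]
  (PySem.List.min? good (fun x => x)).getD 0  -- min(good); good starts with N, so min never raises

-- ===== PRECONDITION & SPEC =====
def Spec_calc_py (N : Int) (K : Int) (S : String) (out : Int) : Prop := out = calc_py_alt N K S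
instance (N : Int) (K : Int) (S : String) (out : Int) : Decidable (Spec_calc_py N K S out) := by unfold Spec_calc_py; infer_instance

-- ===== CLAIM (what is proved, stated in full; the proofs are below) =====
def Claim_equal_calc_py : Prop := ∀ (N : Int) (K : Int) (S : String), Dom_calc_py N K S → Spec_calc_py N K S (calc_py N K S)

-- ===== LEMMAS AND PROOFS =====

-- proof-only abbreviations
def pvStep (d : PySem.Dict Char Int) (c : Char) : PySem.Dict Char Int := d.insert c (d.getD c 0 + 1)
def pvCol (cs : List Char) (y m j : Nat) : List Char := (List.range m).map (fun k => cs.getD (y*k+j) ' ')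
def pvMax (col : List Char) : Int :=
  ((PySem.Set.ofList col).map (fun c => ((List.count c col : Nat) : Int))).foldl max 0
def pvCost (N : Int) (cs : List Char) (y m : Nat) : Int :=
  ((List.range y).map (fun j => PySem.Int.floordiv N (y:Int) - pvMax (pvCol cs y m j))).sum

theorem pvRange_step (y m : Nat) (hy : 0 < y) :
    PySem.List.pyRange 0 (↑(y*m)) ↑y = (List.range m).map (fun k => (↑(y*k) : Int)) := by
  unfold PySem.List.pyRange
  have hy' : (y:Int) ≠ 0 := by exact_mod_cast hy.ne'
  simp only [if_neg hy']
  rcases Nat.eq_zero_or_pos m with hm | hm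
  · subst hm; simp
  · have hpos : (0:Int) < ↑(y*m) := by exact_mod_cast Nat.mul_pos hy hm
    have hy0 : (0:Int) < (y:Int) := by exact_mod_cast hy
    rw [if_pos hy0, if_pos hpos]
    have hnum : ((y*m:Nat):Int) - 0 + ↑y - 1 = ((y*m + (y-1) : Nat) : Int) := by
      push_cast [Nat.cast_sub hy]
      ring
    have hdiv : (y*m + (y-1)) / y = m := by
      apply Nat.div_eq_of_lt_le
      · calc m * y = y * m := Nat.mul_comm m y
          _ ≤ y*m + (y-1) := Nat.le_add_right _ _
      · calc y*m + (y-1) < y*m + y := by omega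
          _ = (m+1) * y := by ring
    rw [hnum, ← Int.natCast_div, hdiv]
    simp only [Int.toNat_natCast]
    apply List.map_congr_left
    intro k _
    push_cast
    ring

theorem pvStep_eq (d : PySem.Dict Char Int) (c : Char) :
    (PySem.Dict.setdefault d c 0).insert c ((PySem.Dict.setdefault d c 0).getD c 0 + 1) = pvStep d c := by
  unfold pvStep PySem.Dict.setdefault
  cases h : d.contains c with
  | true => simp
  | false =>
    have hfind : d.items.find? (fun p => p.1 == c) = none := by
      rw [List.find?_eq_none]
      intro p hp
      have := List.any_eq_false.mp ((by simpa [PySem.Dict.contains] using h : d.items.any (fun p => p.1 == c) = false)) p hp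
      simpa using this
    have hget : PySem.Dict.getD d c 0 = 0 := by
      simp [PySem.Dict.getD, PySem.Dict.get?, hfind]
    have hcontains2 : (PySem.Dict.mk (d.items ++ [(c, 0)])).contains c = true := by
      simp [PySem.Dict.contains]
    have hget2 : PySem.Dict.getD (PySem.Dict.mk (d.items ++ [(c, (0:Int))])) c 0 = 0 := by
      simp [PySem.Dict.getD, PySem.Dict.get?, List.find?_append, hfind]
    rw [if_neg (by simp)]
    rw [hget, hget2]
    unfold PySem.Dict.insert
    rw [if_pos hcontains2, if_neg (by simp [h])]
    congr 1
    rw [List.map_append]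
    congr 1
    · conv_rhs => rw [← List.map_id d.items]
      apply List.map_congr_left
      intro p hp
      have := List.any_eq_false.mp ((by simpa [PySem.Dict.contains] using h : d.items.any (fun p => p.1 == c) = false)) p hp
      simp at this
      simp [this]
    · simp

theorem pvInner (row : List Char) (res : List (PySem.Dict Char Int)) (k : Nat) (hk : k ≤ res.length) :
    ((PySem.List.pyRange 0 (k:Int) 1).foldl
      (fun r lidx => pyListSet r lidx (pvStep (PySem.List.pyGetD r lidx PySem.Dict.empty) (PySem.List.pyGetD row lidx ' '))) res).length = res.length
    ∧ ∀ j : Nat, ((PySem.List.pyRange 0 (k:Int) 1).foldl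
      (fun r lidx => pyListSet r lidx (pvStep (PySem.List.pyGetD r lidx PySem.Dict.empty) (PySem.List.pyGetD row lidx ' '))) res)[j]?
      = if j < k then some (pvStep (res.getD j PySem.Dict.empty) (row.getD j ' ')) else res[j]? := by
  induction k with
  | zero =>
    have : PySem.List.pyRange 0 (0:Int) 1 = [] := by simp
    simp [this]
  | succ k ih =>
    have ih' := ih (Nat.le_of_succ_le hk)
    have hk' : k < res.length := Nat.lt_of_succ_le hk
    have hsplit : PySem.List.pyRange 0 ((k+1:Nat):Int) 1 = PySem.List.pyRange 0 (k:Int) 1 ++ [(k:Int)] := by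
      push_cast
      exact PySem.List.pyRange_one_succ_right (by exact_mod_cast Nat.zero_le k)
    rw [hsplit, List.foldl_append]
    set F := (PySem.List.pyRange 0 (k:Int) 1).foldl
      (fun r lidx => pyListSet r lidx (pvStep (PySem.List.pyGetD r lidx PySem.Dict.empty) (PySem.List.pyGetD row lidx ' '))) res with hF
    simp only [List.foldl_cons, List.foldl_nil]
    have hgetF : PySem.List.pyGetD F (k:Int) PySem.Dict.empty = res.getD k PySem.Dict.empty := by
      rw [PySem.List.pyGetD_natCast, List.getD_eq_getElem?_getD, (ih'.2 k), if_neg (Nat.lt_irrefl k), List.getD_eq_getElem?_getD]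
    have hrow : PySem.List.pyGetD row (k:Int) ' ' = row.getD k ' ' := PySem.List.pyGetD_natCast row k ' '
    constructor
    · simp [pyListSet, hgetF, ih'.1]
    · intro j
      simp only [pyListSet, Int.toNat_natCast, hgetF, hrow]
      rw [List.getElem?_set]
      by_cases hjk : k = j
      · subst hjk
        rw [if_pos rfl, if_pos (by omega), if_pos (by omega)]
      · rw [if_neg hjk, ih'.2 j]
        by_cases hj : j < k
        · rw [if_pos hj, if_pos (by omega)]
        · rw [if_neg hj, if_neg (by omega)]

theorem pvOuter (y : Nat) (chs : List (List Char)) (hch : ∀ row ∈ chs, row.length = y)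
    (res : List (PySem.Dict Char Int)) (hres : res.length = y) :
    (chs.foldl (fun r row => (PySem.List.pyRange 0 (row.length:Int) 1).foldl
        (fun r lidx => pyListSet r lidx (pvStep (PySem.List.pyGetD r lidx PySem.Dict.empty) (PySem.List.pyGetD row lidx ' '))) r) res).length = y
    ∧ ∀ j : Nat, j < y →
      (chs.foldl (fun r row => (PySem.List.pyRange 0 (row.length:Int) 1).foldl
        (fun r lidx => pyListSet r lidx (pvStep (PySem.List.pyGetD r lidx PySem.Dict.empty) (PySem.List.pyGetD row lidx ' '))) r) res)[j]?
      = some (List.foldl pvStep (res.getD j PySem.Dict.empty) (chs.map (fun row => row.getD j ' '))) := by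
  induction chs generalizing res with
  | nil =>
    refine ⟨hres, ?_⟩
    intro j hj
    have hj' : j < res.length := by omega
    simp [List.getD_eq_getElem?_getD, List.getElem?_eq_getElem hj']
  | cons row t ih =>
    have hrow : row.length = y := hch row (List.mem_cons_self)
    have hinner := pvInner row res row.length (by omega)
    simp only [List.foldl_cons]
    set res' := (PySem.List.pyRange 0 (row.length:Int) 1).foldl
      (fun r lidx => pyListSet r lidx (pvStep (PySem.List.pyGetD r lidx PySem.Dict.empty) (PySem.List.pyGetD row lidx ' '))) res with hres'
    have hlen' : res'.length = y := by rw [hinner.1, hres]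
    have iht := ih (fun r hr => hch r (List.mem_cons_of_mem _ hr)) res' hlen'
    refine ⟨iht.1, ?_⟩
    intro j hj
    rw [iht.2 j hj]
    congr 1
    have : res'.getD j PySem.Dict.empty = pvStep (res.getD j PySem.Dict.empty) (row.getD j ' ') := by
      rw [List.getD_eq_getElem?_getD, hinner.2 j, if_pos (by omega)]
      rfl
    rw [List.map_cons, List.foldl_cons, this]

theorem pvChunksFold (rows : List (List Char)) (res0 : List (PySem.Dict Char Int)) :
    (PySem.List.pyRange 0 ((rows.map String.ofList).length : Int)).foldl
      (fun res l =>
        (PySem.List.pyRange 0 (PySem.Str.len (PySem.List.pyGetD (rows.map String.ofList) l ""))).foldl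
          (fun res lidx => pyListSet res lidx
            (((PySem.List.pyGetD res lidx PySem.Dict.empty).setdefault (PySem.List.pyGetD (PySem.List.pyGetD (rows.map String.ofList) l "").toList lidx ' ') 0).insert
              (PySem.List.pyGetD (PySem.List.pyGetD (rows.map String.ofList) l "").toList lidx ' ')
              (((PySem.List.pyGetD res lidx PySem.Dict.empty).setdefault (PySem.List.pyGetD (PySem.List.pyGetD (rows.map String.ofList) l "").toList lidx ' ') 0).getD
                (PySem.List.pyGetD (PySem.List.pyGetD (rows.map String.ofList) l "").toList lidx ' ') 0 + 1)))
          res) res0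
    = rows.foldl (fun r row => (PySem.List.pyRange 0 (row.length:Int) 1).foldl
        (fun r lidx => pyListSet r lidx (pvStep (PySem.List.pyGetD r lidx PySem.Dict.empty) (PySem.List.pyGetD row lidx ' '))) r) res0 := by
  refine Eq.trans (PySem.List.foldl_pyRange_zero_pyGetD' (rows.map String.ofList) ""
    (fun res chunk =>
      (PySem.List.pyRange 0 (PySem.Str.len chunk)).foldl
        (fun res lidx => pyListSet res lidx
          (((PySem.List.pyGetD res lidx PySem.Dict.empty).setdefault (PySem.List.pyGetD chunk.toList lidx ' ') 0).insert
            (PySem.List.pyGetD chunk.toList lidx ' ')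
            (((PySem.List.pyGetD res lidx PySem.Dict.empty).setdefault (PySem.List.pyGetD chunk.toList lidx ' ') 0).getD
              (PySem.List.pyGetD chunk.toList lidx ' ') 0 + 1)))
        res) res0) ?_
  rw [List.foldl_map]
  simp only [PySem.Str.len_eq, String.toList_ofList, pvStep_eq]

theorem pvMakeDict (N K : Int) (S : String) (y m : Nat) (hy : 0 < y) (hm0 : 0 < m)
    (hm : S.toList.length = y * m) :
    makeDictPy N K S (y:Int) = (List.range y).map (fun j => PySem.Dict.counter (pvCol S.toList y m j)) := by
  have hlen : PySem.Str.len S = ((y*m : Nat) : Int) := by rw [PySem.Str.len_eq, hm]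
  have hLs : (PySem.List.pyRange 0 (PySem.Str.len S) (y:Int)).map
        (fun i => PySem.Str.slice S (some i) (some (i + (y:Int))))
      = ((List.range m).map (fun k => (S.toList.drop (y*k)).take y)).map String.ofList := by
    rw [hlen, pvRange_step y m hy, List.map_map, List.map_map]
    apply List.map_congr_left
    intro k _
    show PySem.Str.slice S (some ((y*k:Nat):Int)) (some (((y*k:Nat):Int) + (y:Int))) = _
    unfold PySem.Str.slice PySem.Chars.slice
    rw [PySem.List.slice_natCast_add]
    rfl
  unfold makeDictPy
  simp only []
  rw [hLs]
  have hrowlen : ∀ k, k < m → ((S.toList.drop (y*k)).take y).length = y := by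
    intro k hk
    rw [List.length_take, List.length_drop, hm]
    have : y * (k+1) ≤ y * m := Nat.mul_le_mul_left y hk
    have : y ≤ y*m - y*k := by
      have h2 : y*k + y = y*(k+1) := by ring
      omega
    omega
  have hm' : m = (m-1) + 1 := by omega
  have hfirst : PySem.List.pyGetD (((List.range m).map (fun k => (S.toList.drop (y*k)).take y)).map String.ofList) 0 ""
      = String.ofList ((S.toList.drop (y*0)).take y) := by
    rw [show ((0:Int) = ((0:Nat):Int)) from rfl, PySem.List.pyGetD_natCast]
    rw [hm', List.range_succ_eq_map]
    simp
  rw [hfirst]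
  have hfl : PySem.Str.len (String.ofList ((S.toList.drop (y*0)).take y)) = ((y:Nat):Int) := by
    rw [PySem.Str.len_eq, String.toList_ofList, hrowlen 0 hm0]
  rw [hfl]
  have hres0 : (PySem.List.pyRange 0 ((y:Nat):Int) 1).foldl
      (fun (r : List (PySem.Dict Char Int)) _ => r ++ [PySem.Dict.empty]) []
      = (PySem.List.pyRange 0 ((y:Nat):Int) 1).map (fun _ => PySem.Dict.empty) := by
    rw [PySem.List.foldl_append_singleton_eq_map (fun _ => PySem.Dict.empty)]
    simp
  rw [hres0]
  have hres0len : ((PySem.List.pyRange 0 ((y:Nat):Int) 1).map (fun _ => (PySem.Dict.empty : PySem.Dict Char Int))).length = y := by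
    rw [List.length_map, PySem.List.length_pyRange_one]
    omega
  have hres0getD : ∀ j : Nat, ((PySem.List.pyRange 0 ((y:Nat):Int) 1).map (fun _ => (PySem.Dict.empty : PySem.Dict Char Int))).getD j PySem.Dict.empty = PySem.Dict.empty := by
    intro j
    rw [List.getD_eq_getElem?_getD, List.getElem?_map]
    cases (PySem.List.pyRange 0 ((y:Nat):Int) 1)[j]? <;> rfl
  rw [pvChunksFold]
  have hch : ∀ row ∈ (List.range m).map (fun k => (S.toList.drop (y*k)).take y), row.length = y := by
    intro row hr
    obtain ⟨k, hk, rfl⟩ := List.mem_map.mp hr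
    exact hrowlen k (List.mem_range.mp hk)
  have hout := pvOuter y ((List.range m).map (fun k => (S.toList.drop (y*k)).take y)) hch
    ((PySem.List.pyRange 0 ((y:Nat):Int) 1).map (fun _ => PySem.Dict.empty)) hres0len
  apply List.ext_getElem?
  intro j
  by_cases hj : j < y
  · rw [hout.2 j hj, List.getElem?_map, List.getElem?_range hj]
    rw [hres0getD j]
    congr 1
    rw [List.map_map]
    have hcols : (List.range m).map ((fun row => row.getD j ' ') ∘ (fun k => (S.toList.drop (y*k)).take y))
        = pvCol S.toList y m j := by
      apply List.map_congr_left
      intro k _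
      show ((S.toList.drop (y*k)).take y).getD j ' ' = _
      rw [List.getD_eq_getElem?_getD, List.getElem?_take, if_pos hj, List.getElem?_drop,
        List.getD_eq_getElem?_getD]
    rw [hcols]
    exact PySem.Dict.foldl_insert_getD_add_one_eq_counter (pvCol S.toList y m j)
  · rw [List.getElem?_eq_none (by rw [hout.1]; omega), List.getElem?_eq_none (by simp; omega)]

theorem pvKmax (col : List Char) :
    (PySem.Dict.counter col).keys.foldl (fun kmax key =>
      if kmax < (PySem.Dict.counter col).getD key 0 then (PySem.Dict.counter col).getD key 0 else kmax) 0
    = pvMax col := by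
  rw [PySem.Dict.keys_counter, pvMax, List.foldl_map]
  apply PySem.List.foldl_congr_mem
  intro acc c _
  rw [PySem.Dict.getD_counter]
  rw [max_def]
  split_ifs <;> omega

theorem pvCountA (N K : Int) (S : String) (y m : Nat) (hy : 0 < y) (hm0 : 0 < m)
    (hm : S.toList.length = y * m) :
    ((makeDictPy N K S (y:Int)).foldl
      (fun count d => count + (PySem.Int.floordiv N (y:Int) -
        (d.keys.foldl (fun kmax key => if kmax < d.getD key 0 then d.getD key 0 else kmax) 0))) 0)
    = pvCost N S.toList y m := by
  rw [pvMakeDict N K S y m hy hm0 hm, PySem.List.foldl_add, List.map_map, pvCost]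
  rw [Int.zero_add]
  congr 1
  apply List.map_congr_left
  intro j _
  show PySem.Int.floordiv N (y:Int) -
      ((PySem.Dict.counter (pvCol S.toList y m j)).keys.foldl (fun kmax key =>
        if kmax < (PySem.Dict.counter (pvCol S.toList y m j)).getD key 0
        then (PySem.Dict.counter (pvCol S.toList y m j)).getD key 0 else kmax) 0) = _
  rw [pvKmax]

theorem pvYakusu (L : Int) :
    yakusuPy L = (PySem.List.pyRange 1 (L+1) 1).filter (fun i => PySem.Int.mod L i == 0) := by
  unfold yakusuPy
  rw [PySem.List.foldl_append_if_eq_filter]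
  rfl

-- ----- A's selection fold is the min over N and the acceptable divisors -----
theorem pvFoldMin (g : Int → Int) (K : Int) : ∀ (t : List Int) (r : Int),
    t.foldl (fun res y => if g y > K then res else if res > y then y else res) r
    = (t.filter (fun y => decide (g y ≤ K))).foldl min r := by
  intro t
  induction t with
  | nil => intro r; rfl
  | cons y t ih =>
    intro r
    rw [List.foldl_cons, List.filter_cons]
    by_cases h : g y ≤ K
    · rw [if_neg (show ¬ (g y > K) by omega),
        if_pos (show (decide (g y ≤ K)) = true by simpa using h), List.foldl_cons, ih]
      congr 1
      rw [min_def]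
      split_ifs <;> omega
    · rw [if_pos (show g y > K by omega),
        if_neg (show ¬ (decide (g y ≤ K)) = true by simpa using h), ih]

-- ----- B side: divisor set -----
theorem pvNodupAdd (s : PySem.Set Int) (x : Int) (h : s.Nodup) : (s.add x).Nodup := by
  unfold PySem.Set.add
  split_ifs with hc
  · exact h
  · rw [List.nodup_append]
    refine ⟨h, List.nodup_singleton x, ?_⟩
    intro a ha b hb
    have hb' : b = x := by simpa using hb
    subst hb'
    intro heq
    subst heq
    exact hc (by simpa [PySem.Set.contains] using ha)

theorem pvSqrtStepLe (L d : Int) (h : d * d ≤ L) : d ≤ L ∧ 0 ≤ L := by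
  have h1 : 2 * d - 1 ≤ L := by nlinarith [sq_nonneg (d - 1)]
  have h2 : 0 ≤ L := by nlinarith [mul_self_nonneg d]
  omega

theorem pvMemSqrt (L : Int) (x : Int) : ∀ (n : Nat) (d : Int) (s : PySem.Set Int),
    (L + 1 - d).toNat ≤ n → 0 ≤ L → 1 ≤ d →
    (x ∈ sqrtDivsGo L d s ↔ x ∈ s ∨ ∃ e, d ≤ e ∧ e*e ≤ L ∧ PySem.Int.mod L e = 0 ∧ (x = e ∨ x = PySem.Int.floordiv L e)) := by
  intro n
  induction n with
  | zero =>
    intro d s hn hL hd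
    have hno : ¬ (d * d ≤ L) := by
      intro hdd
      have := pvSqrtStepLe L d hdd
      omega
    rw [sqrtDivsGo, if_neg hno]
    constructor
    · intro h; exact Or.inl h
    · rintro (h | ⟨e, he, hee, -, -⟩)
      · exact h
      · exfalso
        have hd : L + 1 ≤ d := by omega
        nlinarith
  | succ n ih =>
    intro d s hn hL hd
    by_cases hdd : d * d ≤ L
    · have hdL := pvSqrtStepLe L d hdd
      rw [sqrtDivsGo, if_pos hdd]
      rw [ih (d+1) _ (by omega) hL (by omega)]
      have hmem : x ∈ (if PySem.Int.mod L d == 0 then (s.add d).add (PySem.Int.floordiv L d) else s)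
          ↔ x ∈ s ∨ (PySem.Int.mod L d = 0 ∧ (x = d ∨ x = PySem.Int.floordiv L d)) := by
        by_cases hmod : PySem.Int.mod L d = 0
        · rw [if_pos (by simpa using hmod), PySem.Set.mem_add, PySem.Set.mem_add]
          constructor
          · rintro ((h | h) | h)
            · exact Or.inl h
            · exact Or.inr ⟨hmod, Or.inl h⟩
            · exact Or.inr ⟨hmod, Or.inr h⟩
          · rintro (h | ⟨-, (h | h)⟩)
            · exact Or.inl (Or.inl h)
            · exact Or.inl (Or.inr h)
            · exact Or.inr h
        · rw [if_neg (by simpa using hmod)]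
          constructor
          · intro h; exact Or.inl h
          · rintro (h | ⟨hm, -⟩)
            · exact h
            · exact absurd hm hmod
      rw [hmem]
      constructor
      · rintro ((h | ⟨hm, hx⟩) | ⟨e, he, hee, hm, hx⟩)
        · exact Or.inl h
        · exact Or.inr ⟨d, le_refl d, hdd, hm, hx⟩
        · exact Or.inr ⟨e, by omega, hee, hm, hx⟩
      · rintro (h | ⟨e, he, hee, hm, hx⟩)
        · exact Or.inl (Or.inl h)
        · by_cases hed : e = d
          · subst hed; exact Or.inl (Or.inr ⟨hm, hx⟩)
          · exact Or.inr ⟨e, by omega, hee, hm, hx⟩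
    · rw [sqrtDivsGo, if_neg hdd]
      constructor
      · intro h; exact Or.inl h
      · rintro (h | ⟨e, he, hee, -, -⟩)
        · exact h
        · exfalso
          have hde : d * d ≤ e * e := by nlinarith
          omega

theorem pvNodupSqrt (L : Int) : ∀ (n : Nat) (d : Int) (s : PySem.Set Int),
    (L + 1 - d).toNat ≤ n → s.Nodup → (sqrtDivsGo L d s).Nodup := by
  intro n
  induction n with
  | zero =>
    intro d s hn hs
    have hno : ¬ (d * d ≤ L) := by
      intro hdd
      have := pvSqrtStepLe L d hdd
      omega
    rw [sqrtDivsGo, if_neg hno]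
    exact hs
  | succ n ih =>
    intro d s hn hs
    by_cases hdd : d * d ≤ L
    · have hdL := pvSqrtStepLe L d hdd
      rw [sqrtDivsGo, if_pos hdd]
      apply ih (d+1) _ (by omega)
      split_ifs
      · exact pvNodupAdd _ _ (pvNodupAdd _ _ hs)
      · exact hs
    · rw [sqrtDivsGo, if_neg hdd]
      exact hs


theorem pvDivIff (L : Int) (hL : 0 ≤ L) (x : Int) :
    x ∈ sqrtDivsGo L 1 (PySem.Set.empty) ↔ 1 ≤ x ∧ x ≤ L ∧ PySem.Int.mod L x = 0 := by
  rw [pvMemSqrt L x (L + 1 - 1).toNat 1 PySem.Set.empty (le_refl _) hL (le_refl 1)]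
  have hempty : x ∈ (PySem.Set.empty : PySem.Set Int) ↔ False := by
    simp [PySem.Set.empty]
  rw [hempty]
  constructor
  · rintro (h | ⟨e, he1, hee, hm, hx⟩)
    · exact h.elim
    · have he0 : (0:Int) < e := by omega
      have hL1 : 1 ≤ L := by nlinarith
      have hdvd : e ∣ L := (PySem.Int.mod_eq_zero_iff_dvd L e).mp hm
      obtain ⟨c, hc⟩ := hdvd
      have hc1 : 1 ≤ c := by nlinarith
      have hfd : PySem.Int.floordiv L e = c := by
        rw [PySem.Int.floordiv_eq_ediv_of_pos he0, hc, Int.mul_ediv_cancel_left c he0.ne']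
      rcases hx with hx | hx
      · subst hx
        refine ⟨he1, by nlinarith, hm⟩
      · rw [hfd] at hx
        subst hx
        refine ⟨hc1, by nlinarith, ?_⟩
        rw [PySem.Int.mod_eq_zero_iff_dvd]
        exact ⟨e, by rw [hc]; ring⟩
  · rintro ⟨hx1, hxL, hm⟩
    have hx0 : (0:Int) < x := by omega
    have hdvd : x ∣ L := (PySem.Int.mod_eq_zero_iff_dvd L x).mp hm
    obtain ⟨c, hc⟩ := hdvd
    have hL1 : 1 ≤ L := by omega
    have hc1 : 1 ≤ c := by nlinarith
    by_cases hxx : x * x ≤ L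
    · exact Or.inr ⟨x, hx1, hxx, hm, Or.inl rfl⟩
    · refine Or.inr ⟨c, hc1, ?_, ?_, Or.inr ?_⟩
      · have hcx : c < x := by nlinarith
        nlinarith
      · rw [PySem.Int.mod_eq_zero_iff_dvd]
        exact ⟨x, by rw [hc]; ring⟩
      · rw [PySem.Int.floordiv_eq_ediv_of_pos (by omega), hc,
          Int.mul_comm, Int.mul_ediv_cancel_left x (by omega)]

-- ----- B side: run-length scan on a sorted column computes the max multiplicity -----
def pvM (l : List Char) : Int := (l.map (fun c => ((List.count c l : Nat) : Int))).foldl max 0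

theorem pvMaxShift (l : List Int) : ∀ (a b : Int), l.foldl max (max a b) = max a (l.foldl max b) := by
  induction l with
  | nil => intro a b; rfl
  | cons x t ih =>
    intro a b
    rw [List.foldl_cons, List.foldl_cons, max_assoc, ih]

theorem pvRbest (l : List Char) : ∀ (r b : Int) (p : Option Char), 0 ≤ r → 0 ≤ b →
    l.foldl runScan (r, b, p)
      = ((l.foldl runScan (r, 0, p)).1, max b (l.foldl runScan (r, 0, p)).2.1, (l.foldl runScan (r, 0, p)).2.2) := by
  induction l with
  | nil =>
    intro r b p hr hb
    simp [max_eq_left hb]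
  | cons x t ih =>
    intro r b p hr hb
    rw [List.foldl_cons, List.foldl_cons]
    set a := if (some x == p) = true then r + 1 else 1 with ha
    have ha1 : 1 ≤ a := by rw [ha]; split_ifs <;> omega
    have h1 : ∀ b' : Int, runScan (r, b', p) x = (a, max b' a, some x) := by
      intro b'
      unfold runScan
      simp only []
      rw [← ha]
      have : (if a > b' then a else b') = max b' a := by rw [max_def]; split_ifs <;> omega
      rw [this]
    rw [h1 b, h1 0, max_eq_right (by omega : (0:Int) ≤ a)]
    rw [ih a (max b a) (some x) (by omega) (by omega), ih a a (some x) (by omega) (by omega)]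
    simp [max_assoc]

theorem pvRfresh (x : Char) (t : List Char) (r : Int) (p : Option Char) (hp : (some x == p) = false) :
    (x :: t).foldl runScan (r, 0, p) = (x :: t).foldl runScan (0, 0, none) := by
  rw [List.foldl_cons, List.foldl_cons]
  have h1 : runScan (r, 0, p) x = (1, 1, some x) := by
    unfold runScan; simp [hp]
  have h2 : runScan ((0:Int), (0:Int), (none : Option Char)) x = (1, 1, some x) := by
    unfold runScan; simp
  rw [h1, h2]

theorem pvRrepl (c : Char) : ∀ (k : Nat) (i : Int), 1 ≤ i →
    (List.replicate k c).foldl runScan (i, i, some c) = (i + k, i + k, some c) := by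
  intro k
  induction k with
  | zero => intro i hi; simp
  | succ k ih =>
    intro i hi
    rw [List.replicate_succ, List.foldl_cons]
    have h1 : runScan (i, i, some c) c = (i + 1, i + 1, some c) := by
      unfold runScan; simp
    rw [h1, ih (i+1) (by omega)]
    have h3 : i + ((k+1:Nat):Int) = i + 1 + (k:Int) := by push_cast; ring
    rw [h3]

theorem pvSplit (c : Char) : ∀ (s : List Char), (c :: s).Pairwise (· ≤ ·) →
    ∃ (k : Nat) (t : List Char), c :: s = List.replicate (k+1) c ++ t ∧ t.Pairwise (· ≤ ·) ∧ ∀ x ∈ t, c < x := by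
  intro s
  induction s with
  | nil => intro _; exact ⟨0, [], by simp, List.Pairwise.nil, by simp⟩
  | cons x r ih =>
    intro hp
    have hcx : c ≤ x := (List.pairwise_cons.mp hp).1 x List.mem_cons_self
    have hxr : (x :: r).Pairwise (· ≤ ·) := (List.pairwise_cons.mp hp).2
    by_cases he : c = x
    · subst he
      obtain ⟨k, t, heq, hpt, hgt⟩ := ih hxr
      exact ⟨k+1, t, by rw [List.replicate_succ, List.cons_append, ← heq], hpt, hgt⟩
    · refine ⟨0, x :: r, by simp, hxr, ?_⟩
      intro z hz
      rcases List.mem_cons.mp hz with hz | hz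
      · subst hz; exact lt_of_le_of_ne hcx he
      · exact lt_of_lt_of_le (lt_of_le_of_ne hcx he) ((List.pairwise_cons.mp hxr).1 z hz)

theorem pvFoldMaxRepl (v : Int) : ∀ (n : Nat) (a : Int), (List.replicate n v).foldl max a = if n = 0 then a else max a v := by
  intro n
  induction n with
  | zero => intro a; rfl
  | succ n ih =>
    intro a
    rw [List.replicate_succ, List.foldl_cons, ih, if_neg (Nat.succ_ne_zero n)]
    by_cases h : n = 0
    · rw [if_pos h]
    · rw [if_neg h, max_assoc, max_self]

theorem pvMdecomp (k : Nat) (c : Char) (t : List Char) (ht : ∀ x ∈ t, x ≠ c) :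
    pvM (List.replicate (k+1) c ++ t) = max ((k:Int) + 1) (pvM t) := by
  unfold pvM
  have hcnt_c : List.count c (List.replicate (k+1) c ++ t) = k + 1 := by
    rw [List.count_append, List.count_replicate, if_pos (by simp)]
    have : List.count c t = 0 := by
      rw [List.count_eq_zero]
      intro hmem
      exact (ht c hmem) rfl
    omega
  have hcnt_t : ∀ x ∈ t, List.count x (List.replicate (k+1) c ++ t) = List.count x t := by
    intro x hx
    rw [List.count_append, List.count_replicate,
      if_neg (by simpa using fun h : c = x => (ht x hx) h.symm)]
    omega
  rw [List.map_append]
  have hmap1 : (List.replicate (k+1) c).map (fun x => ((List.count x (List.replicate (k+1) c ++ t) : Nat) : Int))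
      = List.replicate (k+1) ((k:Int) + 1) := by
    rw [List.map_replicate, hcnt_c]
    push_cast
    rfl
  have hmap2 : t.map (fun x => ((List.count x (List.replicate (k+1) c ++ t) : Nat) : Int))
      = t.map (fun x => ((List.count x t : Nat) : Int)) := by
    apply List.map_congr_left
    intro x hx
    rw [hcnt_t x hx]
  rw [hmap1, hmap2, List.foldl_append, pvFoldMaxRepl, if_neg (Nat.succ_ne_zero k),
    max_eq_right (by omega : (0:Int) ≤ (k:Int) + 1)]
  have h5 : ((k:Int) + 1) = max ((k:Int) + 1) 0 := (max_eq_left (by omega)).symm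
  conv_lhs => rw [h5]
  rw [pvMaxShift]

theorem pvRunEqM : ∀ (n : Nat) (s : List Char), s.length ≤ n → s.Pairwise (· ≤ ·) →
    (s.foldl runScan (0, 0, none)).2.1 = pvM s := by
  intro n
  induction n with
  | zero =>
    intro s hs _
    have : s = [] := List.eq_nil_of_length_eq_zero (by omega)
    subst this; rfl
  | succ n ih =>
    intro s hs hp
    cases s with
    | nil => rfl
    | cons c rest =>
      obtain ⟨k, t, heq, hpt, hgt⟩ := pvSplit c rest hp
      rw [heq] at hs ⊢
      have hlt : t.length ≤ n := by
        rw [List.length_append, List.length_replicate] at hs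
        omega
      have hscan1 : (List.replicate (k+1) c).foldl runScan ((0:Int), (0:Int), (none : Option Char))
          = (1 + (k:Int), 1 + (k:Int), some c) := by
        rw [List.replicate_succ, List.foldl_cons]
        have h1 : runScan ((0:Int), (0:Int), (none : Option Char)) c = (1, 1, some c) := by
          unfold runScan; simp
        rw [h1, pvRrepl c k 1 (le_refl 1)]
      rw [List.foldl_append, hscan1, pvMdecomp k c t (fun x hx => (hgt x hx).ne')]
      cases t with
      | nil =>
        show (1 + (k:Int)) = max ((k:Int) + 1) (pvM [])
        have hM : pvM [] = 0 := rfl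
        rw [hM, max_eq_left (by omega), add_comm]
      | cons x t' =>
        have hxc : (some x == some c) = false := by
          rw [beq_eq_false_iff_ne]
          intro h
          exact (hgt x List.mem_cons_self).ne' (Option.some.inj h)
        rw [pvRbest (x :: t') (1 + (k:Int)) (1 + (k:Int)) (some c) (by positivity) (by positivity)]
        show max (1 + (k:Int)) ((List.foldl runScan (1 + (k:Int), 0, some c) (x :: t')).2.1) = _
        rw [pvRfresh x t' (1 + (k:Int)) (some c) hxc, ih (x :: t') hlt hpt, add_comm 1 (k:Int)]

theorem pvFoldMaxEq (xs ys : List Int) (h : ∀ x, x ∈ xs ↔ x ∈ ys) :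
    xs.foldl max 0 = ys.foldl max 0 := by
  have hle : ∀ (us vs : List Int), (∀ x, x ∈ us → x ∈ vs) → us.foldl max 0 ≤ vs.foldl max 0 := by
    intro us vs huv
    rcases PySem.List.foldl_max_mem us 0 with hm | hm
    · rw [hm]
      exact (PySem.List.le_foldl_max vs 0).1
    · exact (PySem.List.le_foldl_max vs 0).2 _ (huv _ hm)
  exact le_antisymm (hle xs ys (fun x => (h x).mp)) (hle ys xs (fun x => (h x).mpr))

theorem pvMeqMax (l : List Char) : pvM l = pvMax l := by
  unfold pvM pvMax
  apply pvFoldMaxEq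
  intro x
  simp [List.mem_map, PySem.Set.mem_ofList]

theorem pvMperm (l l' : List Char) (h : l.Perm l') : pvM l = pvM l' := by
  unfold pvM
  have hf : (fun c => ((List.count c l : Nat) : Int)) = (fun c => ((List.count c l' : Nat) : Int)) := by
    funext c
    rw [h.count_eq]
  rw [hf]
  exact (h.map _).foldl_eq 0

-- ----- B side: the stride column is pvCol, its cost fold is pvCost -----
theorem pvColB (cs : List Char) (y m j : Nat) (hy : 0 < y) (hj : j < y) (hm0 : 0 < m)
    (hm : cs.length = y * m) :
    (PySem.List.pyRange (j:Int) ((cs.length:Int)) (y:Int)).map (fun i => PySem.List.pyGetD cs i ' ')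
    = pvCol cs y m j := by
  have hy' : (0:Int) < (y:Int) := by exact_mod_cast hy
  rw [PySem.List.pyRange_of_pos (j:Int) ((cs.length:Int)) hy']
  have hjm : j < y * m := lt_of_lt_of_le hj (Nat.le_mul_of_pos_right y hm0)
  have hcond : ((j:Int) < (cs.length:Int)) := by
    rw [hm]; exact_mod_cast hjm
  rw [if_pos hcond]
  have hnum : (cs.length:Int) - (j:Int) + (y:Int) - 1 = ((y:Int) - 1 - (j:Int)) + (y:Int) * (m:Int) := by
    rw [hm]; push_cast; ring
  have hdiv : (((y:Int) - 1 - (j:Int)) + (y:Int) * (m:Int)) / (y:Int) = (m:Int) := by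
    rw [Int.add_mul_ediv_left _ _ hy'.ne']
    rw [Int.ediv_eq_zero_of_lt (by omega) (by omega)]
    rw [Int.zero_add]
  rw [hnum, hdiv, Int.toNat_natCast, List.map_map]
  unfold pvCol
  apply List.map_congr_left
  intro k _
  show PySem.List.pyGetD cs ((j:Int) + (y:Int) * (k:Int)) ' ' = cs.getD (y*k+j) ' '
  have hcast : (j:Int) + (y:Int) * (k:Int) = ((y*k+j : Nat):Int) := by push_cast; ring
  rw [hcast, PySem.List.pyGetD_natCast]

theorem pvCostBeq (N : Int) (cs : List Char) (y m : Nat) (hy : 0 < y) (hm0 : 0 < m)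
    (hm : cs.length = y * m) :
    (PySem.List.pyRange 0 ((y:Int)) 1).foldl (fun cost r =>
      cost + (PySem.Int.floordiv N (y:Int) -
        ((PySem.List.sorted ((PySem.List.pyRange r ((cs.length:Int)) (y:Int)).map (fun i => PySem.List.pyGetD cs i ' ')) (fun c => c)).foldl runScan (0, 0, none)).2.1)) 0
    = pvCost N cs y m := by
  rw [PySem.List.pyRange_zero_natCast y, List.foldl_map, PySem.List.foldl_add, Int.zero_add]
  unfold pvCost
  congr 1
  apply List.map_congr_left
  intro j hj
  have hj' : j < y := List.mem_range.mp hj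
  congr 1
  rw [pvColB cs y m j hy hj' hm0 hm]
  have hpw : (PySem.List.sorted (pvCol cs y m j) (fun c => c)).Pairwise (· ≤ ·) := by
    simpa using PySem.List.sorted_pairwise (pvCol cs y m j) (fun c => c)
  rw [pvRunEqM (PySem.List.sorted (pvCol cs y m j) (fun c => c)).length _ (le_refl _) hpw]
  rw [pvMperm _ _ (PySem.List.sorted_perm (pvCol cs y m j) (fun c => c) false), pvMeqMax]

-- the divisor lists of the two programs agree as (nodup) lists up to permutation
theorem pvDivPerm (len : Nat) :
    ((PySem.List.pyRange 1 ((len:Int)+1) 1).filter (fun i => PySem.Int.mod (len:Int) i == 0)).Perm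
      (sqrtDivsGo (len:Int) 1 PySem.Set.empty) := by
  rw [List.perm_ext_iff_of_nodup]
  · intro x
    rw [List.mem_filter, PySem.List.mem_pyRange_one, pvDivIff (len:Int) (by positivity) x]
    constructor
    · rintro ⟨⟨h1, h2⟩, h3⟩
      exact ⟨h1, by omega, by simpa using h3⟩
    · rintro ⟨h1, h2, h3⟩
      exact ⟨⟨h1, by omega⟩, by simpa using h3⟩
  · exact ((PySem.List.pairwise_lt_pyRange_one 1 ((len:Int)+1)).imp ne_of_lt).filter _
  · exact pvNodupSqrt (len:Int) ((len:Int) + 1 - 1).toNat 1 PySem.Set.empty (le_refl _) (by simp [PySem.Set.empty])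

-- common form of both acceptance predicates on divisors
def pvP (N K : Int) (cs : List Char) : Int → Bool :=
  fun y => decide (pvCost N cs y.toNat (cs.length / y.toNat) ≤ K)

theorem pvDivFacts (len : Nat) (y : Int) (h1 : 1 ≤ y) (h2 : y ≤ (len:Int))
    (h3 : PySem.Int.mod (len:Int) y = 0) :
    0 < y.toNat ∧ 0 < len / y.toNat ∧ len = y.toNat * (len / y.toNat) := by
  have hy0 : (0:Int) < y := by omega
  have hdvd : y ∣ (len:Int) := (PySem.Int.mod_eq_zero_iff_dvd _ _).mp h3
  have hyn : y = ((y.toNat:Nat):Int) := (Int.toNat_of_nonneg (by omega)).symm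
  have hdvdn : y.toNat ∣ len := by
    rw [hyn] at hdvd
    exact_mod_cast hdvd
  have hpos : 0 < y.toNat := by omega
  have hle : y.toNat ≤ len := by
    have : ((y.toNat:Nat):Int) ≤ (len:Int) := by rw [← hyn]; exact h2
    exact_mod_cast this
  refine ⟨hpos, Nat.div_pos hle hpos, (Nat.mul_div_cancel' hdvdn).symm⟩

-- Python min(good) over the append-loop result, as a min-fold over the filtered list
theorem pvBmin (g : Int → Int) (K N : Int) (l : List Int) :
    (PySem.List.min? (l.foldl (fun acc y => if g y ≤ K then acc ++ [y] else acc) [N]) (fun x => x)).getD 0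
    = (l.filter (fun y => decide (g y ≤ K))).foldl min N := by
  have h := PySem.List.foldl_append_if_eq_filter (fun y => decide (g y ≤ K)) l [N]
  simp only [decide_eq_true_eq] at h
  rw [h, List.singleton_append, PySem.List.min?_id_cons, Option.getD_some]

-- the final min-fold over two permuted divisor lists carrying equal predicates
theorem pvFinal (la lb : List Int) (pa pb q : Int → Bool) (N : Int)
    (hperm : la.Perm lb) (hpa : ∀ y ∈ la, pa y = q y) (hpb : ∀ y ∈ lb, pb y = q y) :
    (la.filter pa).foldl min N = (lb.filter pb).foldl min N := by
  rw [List.filter_congr hpa, List.filter_congr hpb]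
  exact (hperm.filter q).foldl_eq N

-- ===== VERDICT (by name: the statement is the Claim_ definition above) =====
theorem calc_py_spec : Claim_equal_calc_py := by
  intro N K S _
  unfold Spec_calc_py calc_py calc_py_alt
  simp only [PySem.Str.len_eq]
  -- A side: fold over divisors → min-fold over accepted divisors
  rw [pvYakusu, pvFoldMin]
  -- B side: append-loop → [N] ++ filter, then min(good) → min-fold
  refine Eq.trans ?_ (pvBmin (fun y => (PySem.List.pyRange 0 y 1).foldl (fun cost r =>
        cost + (PySem.Int.floordiv N y -
          ((PySem.List.sorted ((PySem.List.pyRange r ((S.toList.length:Int)) y).map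
            (fun i => PySem.List.pyGetD S.toList i ' ')) (fun c => c)).foldl runScan (0, 0, none)).2.1)) 0)
      K N (sqrtDivsGo ((S.toList.length:Int)) 1 PySem.Set.empty)).symm
  refine pvFinal _ _ _ _ (pvP N K S.toList) N (pvDivPerm S.toList.length) ?_ ?_
  · intro y hy
    rw [List.mem_filter, PySem.List.mem_pyRange_one] at hy
    obtain ⟨⟨hy1, hy2⟩, hy3⟩ := hy
    obtain ⟨hp, hm0, hml⟩ := pvDivFacts S.toList.length y hy1 (by omega) (by simpa using hy3)
    have hyn : y = ((y.toNat:Nat):Int) := (Int.toNat_of_nonneg (by omega)).symm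
    rw [pvP]
    congr 1
    rw [hyn, pvCountA N K S y.toNat (S.toList.length / y.toNat) hp hm0 hml]
    rw [Int.toNat_natCast]
  · intro y hy
    rw [pvDivIff (S.toList.length:Int) (by positivity) y] at hy
    obtain ⟨hy1, hy2, hy3⟩ := hy
    obtain ⟨hp, hm0, hml⟩ := pvDivFacts S.toList.length y hy1 hy2 hy3
    have hyn : y = ((y.toNat:Nat):Int) := (Int.toNat_of_nonneg (by omega)).symm
    rw [pvP]
    congr 1
    rw [hyn, pvCostBeq N S.toList y.toNat (S.toList.length / y.toNat) hp hm0 hml]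
    rw [Int.toNat_natCast]
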